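-- pv_equiv track=rewrite | github.com/RobinGummels/AX_Ploration | data_import/neo4j_relations.py | get_parent_function_code
-- ===== SOURCE A (Python) =====
-- def get_parent_function_code(code: int) -> int | None:
--     factor = 1
--     temp = code
--     while temp > 0:
--         digit = temp % 10
--         if digit != 0:
--             parent = code - digit * factor
--             return parent if parent != code else None
--         factor *= 10
--         temp //= 10
--     return None
-- ===== SOURCE B (Python) =====
-- def get_parent_function_code(code: int) -> int | None:
--     if code <= 0:
--         return None
--     s = str(code)
--     stripped = s.rstrip('0')
--     zeros = len(s) - len(stripped)
--     d = ord(stripped[-1]) - ord('0')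
--     return code - d * 10 ** zeros
-- ===== Notes on version B (the rewrite author's own statement) =====
-- stated objective: simpler
-- what changed: Replaces A's modulo/divide digit-scanning while-loop (with factor and temp accumulators and an in-loop early return) by a loop-free decimal-string formulation: strip trailing zeros from str(code), read off the lowest nonzero digit and the zero count, and subtract the digit shifted back to its decimal place in one closed-form expression.
import Mathlib
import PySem

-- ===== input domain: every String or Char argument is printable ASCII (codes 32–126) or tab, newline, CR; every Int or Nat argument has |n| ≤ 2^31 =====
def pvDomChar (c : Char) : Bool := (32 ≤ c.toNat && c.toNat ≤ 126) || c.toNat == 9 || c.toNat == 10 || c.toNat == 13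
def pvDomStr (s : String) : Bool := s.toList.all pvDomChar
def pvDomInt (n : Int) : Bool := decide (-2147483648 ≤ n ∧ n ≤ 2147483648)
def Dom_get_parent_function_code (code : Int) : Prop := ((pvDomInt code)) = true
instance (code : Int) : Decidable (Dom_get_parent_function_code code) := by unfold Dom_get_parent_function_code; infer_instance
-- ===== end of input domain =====

-- B replaces A's modulo/divide digit-scanning while-loop by a loop-free decimal-string
-- formulation (strip trailing zeros of str(code), closed-form subtraction); objective: simpler.


-- ===== PORT A =====
-- the `while temp > 0:` loop of A, with its `factor` and `temp` state; recursion on temp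
def pvALoop (code factor temp : Int) : Option Int :=
  if h : temp > 0 then
    let digit := PySem.Int.mod temp 10
    if digit ≠ 0 then
      let parent := code - digit * factor
      if parent ≠ code then some parent else none
    else
      pvALoop code (factor * 10) (PySem.Int.floordiv temp 10)
  else none
termination_by temp.toNat
decreasing_by
  have h10 : PySem.Int.floordiv temp 10 = temp / 10 := by
    simp [PySem.Int.floordiv, Int.fdiv_eq_ediv_of_nonneg]
  have hlt : temp / 10 < temp := by
    rw [Int.ediv_lt_iff_lt_mul (by norm_num)]; nlinarith
  have hnn : 0 ≤ temp / 10 := Int.ediv_nonneg (le_of_lt h) (by norm_num)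
  rw [h10]; omega

def get_parent_function_code (code : Int) : Option Int :=
  pvALoop code 1 code

-- ===== PORT B =====
def get_parent_function_code_alt (code : Int) : Option Int :=
  if code ≤ 0 then none
  else
    let cs := PySem.Int.toChars code                           -- s = str(code)
    let stripped := (cs.reverse.dropWhile (· == '0')).reverse  -- s.rstrip('0'), exact port
    let zeros := cs.length - stripped.length                   -- len(s) - len(stripped)
    match PySem.List.pyGet? stripped (-1) with                 -- stripped[-1]
    | some c => some (code - ((c.toNat : Int) - 48) * 10 ^ zeros)  -- ord(c) - ord('0'); code - d*10**zeros
    | none => none                                             -- IndexError (unreachable: code > 0)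

-- ===== PRECONDITION & SPEC =====
def Spec_get_parent_function_code (code : Int) (out : Option Int) : Prop := out = get_parent_function_code_alt code
instance (code : Int) (out : Option Int) : Decidable (Spec_get_parent_function_code code out) := by unfold Spec_get_parent_function_code; infer_instance

-- ===== CLAIM (what is proved, stated in full; the proofs are below) =====
def Claim_equal_get_parent_function_code : Prop := ∀ (code : Int), Dom_get_parent_function_code code → Spec_get_parent_function_code code (get_parent_function_code code)

-- ===== LEMMAS AND PROOFS =====

-- reference value: (lowest nonzero decimal digit of m) * 10^(number of trailing zeros)
def pvRef (m : Nat) : Int :=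
  if m = 0 then 0
  else if m % 10 = 0 then 10 * pvRef (m / 10)
  else (m % 10 : Int)
termination_by m
decreasing_by exact Nat.div_lt_self (by omega) (by omega)

-- little-endian decimal digit characters of m
def pvD (m : Nat) : List Char :=
  if m < 10 then [Nat.digitChar m]
  else Nat.digitChar (m % 10) :: pvD (m / 10)
termination_by m
decreasing_by exact Nat.div_lt_self (by omega) (by omega)

theorem pvToDigitsCore_eq (n : Nat) : ∀ (f : Nat) (acc : List Char), n < f →
    Nat.toDigitsCore 10 f n acc = (pvD n).reverse ++ acc := by
  induction n using Nat.strong_induction_on with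
  | _ n ih =>
    intro f acc hf
    match f with
    | 0 => omega
    | f + 1 =>
      by_cases h : n < 10
      · have hd : n / 10 = 0 := Nat.div_eq_of_lt h
        have hm : n % 10 = n := Nat.mod_eq_of_lt h
        rw [pvD]
        simp [Nat.toDigitsCore, hd, hm, h]
      · have hlt : n / 10 < n := Nat.div_lt_self (by omega) (by omega)
        have hd : ¬ (n / 10 = 0) := by omega
        rw [pvD]
        simp only [Nat.toDigitsCore, hd, if_false, h, if_false]
        rw [ih (n / 10) hlt f (Nat.digitChar (n % 10) :: acc) (by omega)]
        simp

theorem pvToChars_pos (code : Int) (h : 0 < code) :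
    PySem.Int.toChars code = (pvD code.toNat).reverse := by
  have : ¬ code < 0 := by omega
  simp only [PySem.Int.toChars, this, if_false]
  rw [Nat.toDigits, pvToDigitsCore_eq code.toNat (code.toNat + 1) [] (by omega)]
  simp

theorem pvDigitChar_ne_zero {d : Nat} (h1 : d < 10) (h2 : d ≠ 0) : Nat.digitChar d ≠ '0' := by
  interval_cases d <;> simp_all <;> decide

theorem pvDigitChar_toNat {d : Nat} (h1 : d < 10) : (Nat.digitChar d).toNat = d + 48 := by
  interval_cases d <;> decide

-- head digit of the stripped little-endian digit list, scaled by the zero count, is pvRef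
theorem pvCore (m : Nat) (hm : 0 < m) :
    (pvD m).dropWhile (· == '0') ≠ [] ∧
    ((((((pvD m).dropWhile (· == '0')).headD '0').toNat : Int) - 48) *
      10 ^ ((pvD m).length - ((pvD m).dropWhile (· == '0')).length) = pvRef m) := by
  induction m using Nat.strong_induction_on with
  | _ m ih =>
    by_cases hz : m % 10 = 0
    · -- trailing zero: m ≥ 10, pvD m = '0' :: pvD (m/10)
      have h10 : ¬ m < 10 := by omega
      have hq : 0 < m / 10 := Nat.div_pos (by omega) (by omega)
      have hlt : m / 10 < m := Nat.div_lt_self hm (by omega)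
      obtain ⟨hne, hval⟩ := ih (m / 10) hlt hq
      have hDm : pvD m = '0' :: pvD (m / 10) := by
        rw [pvD]; simp [h10, hz]; rfl
      have hLe : ((pvD (m / 10)).dropWhile (· == '0')).length ≤ (pvD (m / 10)).length :=
        List.length_dropWhile_le _ _
      rw [hDm]
      constructor
      · simpa using hne
      · have hdw : (('0' :: pvD (m / 10)).dropWhile (· == '0')) =
            (pvD (m / 10)).dropWhile (· == '0') := by simp
        rw [hdw]
        have hlen : ('0' :: pvD (m / 10)).length - ((pvD (m / 10)).dropWhile (· == '0')).length
            = ((pvD (m / 10)).length - ((pvD (m / 10)).dropWhile (· == '0')).length) + 1 := by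
          simp only [List.length_cons]; omega
        rw [hlen, pow_succ, pvRef]
        have hm0 : ¬ m = 0 := by omega
        simp only [hm0, if_false, hz, if_true]
        rw [← hval]; ring
    · -- last digit nonzero: dropWhile keeps everything
      have hd9 : m % 10 < 10 := Nat.mod_lt _ (by omega)
      have hne0 : Nat.digitChar (m % 10) ≠ '0' := pvDigitChar_ne_zero hd9 hz
      have hDm : ∃ t, pvD m = Nat.digitChar (m % 10) :: t := by
        by_cases h10 : m < 10
        · exact ⟨[], by rw [pvD]; simp [h10, Nat.mod_eq_of_lt h10]⟩
        · exact ⟨pvD (m / 10), by rw [pvD]; simp [h10]⟩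
      obtain ⟨t, ht⟩ := hDm
      rw [ht]
      have hdw : ((Nat.digitChar (m % 10) :: t).dropWhile (· == '0'))
          = Nat.digitChar (m % 10) :: t := by
        rw [List.dropWhile_cons_of_neg]; simpa using hne0
      rw [hdw]
      refine ⟨by simp, ?_⟩
      simp only [List.headD_cons, List.length_cons, Nat.sub_self, pow_zero, mul_one]
      rw [pvDigitChar_toNat hd9, pvRef]
      have : ¬ m = 0 := by omega
      simp [this, hz]

theorem pvALoop_eq (m : Nat) : 0 < m → ∀ (code factor : Int), factor ≠ 0 →
    pvALoop code factor (m : Int) = some (code - pvRef m * factor) := by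
  induction m using Nat.strong_induction_on with
  | _ m ih =>
    intro hm code factor hf
    have hpos : ((m : Int) > 0) := by exact_mod_cast hm
    rw [pvALoop]
    simp only [hpos, dite_true]
    have hmod : PySem.Int.mod (m : Int) 10 = ((m % 10 : Nat) : Int) := by
      simp [PySem.Int.mod, Int.fmod_eq_emod_of_nonneg]
    by_cases hz : m % 10 = 0
    · have hq : 0 < m / 10 := Nat.div_pos (by omega) (by omega)
      have hlt : m / 10 < m := Nat.div_lt_self hm (by omega)
      have hdiv : PySem.Int.floordiv (m : Int) 10 = ((m / 10 : Nat) : Int) := by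
        simp [PySem.Int.floordiv, Int.fdiv_eq_ediv_of_nonneg]
      simp only [hmod, hz, Nat.cast_zero, ne_eq, not_true_eq_false, if_false, hdiv]
      rw [ih (m / 10) hlt hq code (factor * 10) (by simp [hf])]
      conv_rhs => rw [pvRef]
      have hm0 : ¬ m = 0 := by omega
      simp only [hm0, if_false, hz, if_true]
      congr 1; ring
    · have hdig : ((m % 10 : Nat) : Int) ≠ 0 := by exact_mod_cast hz
      have hprod : ((m % 10 : Nat) : Int) * factor ≠ 0 := mul_ne_zero hdig hf
      have hne : code - ((m % 10 : Nat) : Int) * factor ≠ code := by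
        intro h; apply hprod; omega
      simp only [hmod, hdig, ne_eq, not_false_eq_true, if_true, hne]
      conv_rhs => rw [pvRef]
      have hm0 : ¬ m = 0 := by omega
      simp [hm0, hz]

theorem pvGetLast (xs : List Char) (h : xs ≠ []) :
    PySem.List.pyGet? xs.reverse (-1) = some (xs.headD '0') := by
  match xs, h with
  | a :: t, _ =>
    simp [PySem.List.pyGet?, PySem.List.pyIdx?]

-- ===== VERDICT (by name: the statement is the Claim_ definition above) =====
theorem get_parent_function_code_spec : Claim_equal_get_parent_function_code := by
  unfold Claim_equal_get_parent_function_code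
  intro code _
  unfold Spec_get_parent_function_code get_parent_function_code get_parent_function_code_alt
  by_cases hle : code ≤ 0
  · -- A: loop never runs; B: the guard
    rw [pvALoop]
    simp [hle, not_lt.mpr hle]
  · rw [not_le] at hle
    have hm : 0 < code.toNat := by omega
    have hcast : ((code.toNat : Int)) = code := by omega
    simp only [not_le.mpr hle, if_false]
    obtain ⟨hne, hval⟩ := pvCore code.toNat hm
    rw [pvToChars_pos code hle]
    simp only [List.reverse_reverse, List.length_reverse]
    rw [pvGetLast _ hne]
    have hA := pvALoop_eq code.toNat hm code 1 one_ne_zero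
    rw [hcast] at hA
    rw [hA, ← hval]
    simp
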